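-- pv_equiv track=rewrite | github.com/Hanbrar/AI-Mac-Assistant | foldername.py | getFoldername
-- ===== SOURCE A (Python) =====
-- def getFoldername(text):
--     t=False
--     text=text.split()
--     text1=""
--     for word in text:
--
--         if(t):
--             text1=word
--             break
--         if(word=="named"):
--             t=True
--     return text1
-- ===== SOURCE B (Python) =====
-- def getFoldername(text):
--     result = ""
--     following = None
--     for word in reversed(text.split()):
--         if word == "named" and following is not None:
--             result = following
--         following = word
--     return result
-- ===== Notes on version B (the rewrite author's own statement) =====
-- stated objective: alternative
-- what changed: Replaces A's forward flag-and-break scan with a back-to-front traversal of the word list that carries the following word and overwrites the result at each marker word, so the first occurrence's successor wins last; same O(n) cost.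
import Mathlib
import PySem

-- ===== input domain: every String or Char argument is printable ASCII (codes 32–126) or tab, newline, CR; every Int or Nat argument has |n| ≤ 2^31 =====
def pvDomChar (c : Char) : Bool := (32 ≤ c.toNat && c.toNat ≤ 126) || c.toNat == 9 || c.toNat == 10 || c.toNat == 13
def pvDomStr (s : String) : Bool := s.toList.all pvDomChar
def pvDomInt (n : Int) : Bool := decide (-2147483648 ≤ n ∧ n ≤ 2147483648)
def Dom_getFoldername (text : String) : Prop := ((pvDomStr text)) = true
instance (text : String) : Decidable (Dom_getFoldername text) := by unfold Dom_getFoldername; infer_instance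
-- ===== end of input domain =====

-- B scans the word list back-to-front carrying the following word, overwriting at each "named"; alternative decomposition, no speed claim.
-- ===== PORT A =====
-- the loop: t is the flag, break returns the current word; text1 stays "" if no break happens
def getFoldernameLoop (t : Bool) (ws : List String) : String :=
  match ws with
  | [] => ""
  | w :: ws => if t then w else if w = "named" then getFoldernameLoop true ws else getFoldernameLoop t ws

def getFoldername (text : String) : String :=
  getFoldernameLoop false (PySem.Str.split₀ text)

-- ===== PORT B =====
-- state: (result, following word seen so far e.g. the word AFTER the current one in the text)
def getFoldernameAltStep (st : String × Option String) (word : String) : String × Option String :=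
  (match st.2 with
   | some f => if word = "named" then (f, some word) else (st.1, some word)
   | none => (st.1, some word))

def getFoldername_alt (text : String) : String :=
  ((PySem.Str.split₀ text).reverse.foldl getFoldernameAltStep ("", none)).1

-- ===== PRECONDITION & SPEC =====
def Spec_getFoldername (text : String) (out : String) : Prop := out = getFoldername_alt text
instance (text : String) (out : String) : Decidable (Spec_getFoldername text out) := by unfold Spec_getFoldername; infer_instance

-- ===== CLAIM (what is proved, stated in full; the proofs are below) =====
def Claim_equal_getFoldername : Prop := ∀ (text : String), Dom_getFoldername text → Spec_getFoldername text (getFoldername text)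

-- ===== LEMMAS AND PROOFS =====
-- loop with flag set returns the next word (or "")
theorem loop_true (ws : List String) : getFoldernameLoop true ws = ws.head?.getD "" := by
  cases ws <;> simp [getFoldernameLoop]

-- invariant: the backward fold's state after ws.reverse is (A's answer on ws, head of ws)
theorem fold_inv (ws : List String) :
    ws.reverse.foldl getFoldernameAltStep ("", none) = (getFoldernameLoop false ws, ws.head?) := by
  induction ws with
  | nil => simp [getFoldernameLoop]
  | cons w rest ih =>
    simp only [List.reverse_cons, List.foldl_append, ih, List.foldl_cons, List.foldl_nil]
    cases rest with
    | nil => simp [getFoldernameAltStep, getFoldernameLoop]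
    | cons r rs =>
      by_cases hw : w = "named" <;>
        simp [getFoldernameAltStep, getFoldernameLoop, hw, loop_true]

-- ===== VERDICT (by name: the statement is the Claim_ definition above) =====
theorem getFoldername_spec : Claim_equal_getFoldername := by
  intro text _
  unfold Spec_getFoldername getFoldername getFoldername_alt
  rw [fold_inv]
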